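-- pv_equiv track=rewrite | github.com/gabrielfontana/programacao-linear | lista4_exercicio1.py | MatrizDi
-- ===== SOURCE A (Python) =====
-- def MatrizDi(matriz_coeficientes, matriz_termos, coluna):
--     matriz_di = []
--     for i in range(len(matriz_coeficientes)):
--         linha = []
--         for j in range(len(matriz_coeficientes[0])):
--             if j == coluna:
--                 elemento = matriz_termos[i][0]
--             else:
--                 elemento = matriz_coeficientes[i][j]
--             linha.append(elemento)
--         matriz_di.append(linha)
--     return matriz_di
-- ===== SOURCE B (Python) =====
-- def MatrizDi(matriz_coeficientes, matriz_termos, coluna):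
--     # Column-major construction: build the result column by column
--     # (terms column where j == coluna, coefficient column otherwise),
--     # then transpose the column list back into rows.
--     n = len(matriz_coeficientes)
--     w = len(matriz_coeficientes[0]) if matriz_coeficientes else 0
--     cols = []
--     for j in range(w):
--         if j == coluna:
--             cols.append([matriz_termos[i][0] for i in range(n)])
--         else:
--             cols.append([matriz_coeficientes[i][j] for i in range(n)])
--     return [[c[i] for c in cols] for i in range(n)]
-- ===== Notes on version B (the rewrite author's own statement) =====
-- stated objective: alternative
-- what changed: Builds the result column by column (the terms vector as column coluna, coefficient columns elsewhere) and transposes the list of columns back into rows, instead of A's row-by-row rebuild with a per-element j==coluna branch.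
import Mathlib
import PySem

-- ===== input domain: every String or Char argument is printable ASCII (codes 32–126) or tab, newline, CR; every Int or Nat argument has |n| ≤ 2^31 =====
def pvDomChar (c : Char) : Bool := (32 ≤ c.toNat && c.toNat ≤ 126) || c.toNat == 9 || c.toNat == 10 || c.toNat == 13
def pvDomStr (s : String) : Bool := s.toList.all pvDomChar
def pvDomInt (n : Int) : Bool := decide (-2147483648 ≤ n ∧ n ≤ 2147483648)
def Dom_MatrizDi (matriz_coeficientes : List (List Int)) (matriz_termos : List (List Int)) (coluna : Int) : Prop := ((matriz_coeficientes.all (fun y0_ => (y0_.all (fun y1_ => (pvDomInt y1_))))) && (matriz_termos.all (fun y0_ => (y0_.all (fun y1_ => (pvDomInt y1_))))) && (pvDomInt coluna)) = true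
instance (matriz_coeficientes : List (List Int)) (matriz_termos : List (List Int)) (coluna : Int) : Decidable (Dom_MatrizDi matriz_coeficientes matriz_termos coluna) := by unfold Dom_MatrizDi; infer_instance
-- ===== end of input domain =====

-- B builds the result column by column (terms column at index coluna, coefficient columns elsewhere)
-- and then transposes the column list back into rows (objective: alternative).

-- ===== PORT A =====
def MatrizDi (matriz_coeficientes : List (List Int)) (matriz_termos : List (List Int)) (coluna : Int) : List (List Int) :=
  (List.range matriz_coeficientes.length).foldl (fun matriz_di i =>
    let linha := (List.range (matriz_coeficientes.headD []).length).foldl (fun linha (j : Nat) =>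
      let elemento : Int :=
        if (j : Int) = coluna then
          ((matriz_termos.getD i []).getD 0 0)       -- matriz_termos[i][0]; in range under Pre_
        else
          ((matriz_coeficientes.getD i []).getD j 0) -- matriz_coeficientes[i][j]; in range under Pre_
      linha ++ [elemento]) []
    matriz_di ++ [linha]) []

-- ===== PORT B =====
def MatrizDi_alt (matriz_coeficientes : List (List Int)) (matriz_termos : List (List Int)) (coluna : Int) : List (List Int) :=
  let n := matriz_coeficientes.length
  let w := (matriz_coeficientes.headD []).length   -- len(matriz_coeficientes[0]) if matriz_coeficientes else 0
  let cols := (List.range w).foldl (fun cols (j : Nat) =>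
    let col : List Int :=
      if (j : Int) = coluna then
        (List.range n).map (fun i => ((matriz_termos.getD i []).getD 0 0))       -- in range under Pre_
      else
        (List.range n).map (fun i => ((matriz_coeficientes.getD i []).getD j 0)) -- in range under Pre_
    cols ++ [col]) []
  (List.range n).map (fun i => cols.map (fun c => c.getD i 0))

-- ===== PRECONDITION & SPEC =====
-- Pre_ is exactly where the Python A returns: every coefficient row reaches the first row's width
-- (or misses only index coluna = w-1, which A never reads), and — when coluna targets a real
-- column — a nonempty term row exists for each coefficient row; elsewhere A raises IndexError.
def Pre_MatrizDi (matriz_coeficientes : List (List Int)) (matriz_termos : List (List Int)) (coluna : Int) : Prop :=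
  (∀ row ∈ matriz_coeficientes,
     (matriz_coeficientes.headD []).length ≤ row.length ∨
     (row.length + 1 = (matriz_coeficientes.headD []).length ∧ (row.length : Int) = coluna)) ∧
  ((0 ≤ coluna ∧ coluna < ((matriz_coeficientes.headD []).length : Int)) →
     (matriz_coeficientes.length ≤ matriz_termos.length ∧
      ∀ row ∈ matriz_termos.take matriz_coeficientes.length, row ≠ []))
instance (matriz_coeficientes : List (List Int)) (matriz_termos : List (List Int)) (coluna : Int) : Decidable (Pre_MatrizDi matriz_coeficientes matriz_termos coluna) := by unfold Pre_MatrizDi; infer_instance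

def pvWitness_MatrizDi : List (List Int) × List (List Int) × Int := ([[1, 2], [3, 4]], [[9], [8]], 1)

def Spec_MatrizDi (matriz_coeficientes : List (List Int)) (matriz_termos : List (List Int)) (coluna : Int) (out : List (List Int)) : Prop := out = MatrizDi_alt matriz_coeficientes matriz_termos coluna
instance (matriz_coeficientes : List (List Int)) (matriz_termos : List (List Int)) (coluna : Int) (out : List (List Int)) : Decidable (Spec_MatrizDi matriz_coeficientes matriz_termos coluna out) := by unfold Spec_MatrizDi; infer_instance

-- ===== CLAIM (what is proved, stated in full; the proofs are below) =====
def Claim_equal_MatrizDi : Prop := ∀ (matriz_coeficientes : List (List Int)) (matriz_termos : List (List Int)) (coluna : Int), Dom_MatrizDi matriz_coeficientes matriz_termos coluna → Pre_MatrizDi matriz_coeficientes matriz_termos coluna → Spec_MatrizDi matriz_coeficientes matriz_termos coluna (MatrizDi matriz_coeficientes matriz_termos coluna)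

-- ===== LEMMAS AND PROOFS =====

theorem pv_foldl_snoc {α β : Type} (g : α → β) (xs : List α) (init : List β) :
    xs.foldl (fun a x => a ++ [g x]) init = init ++ xs.map g := by
  induction xs generalizing init with
  | nil => simp
  | cons x xs ih => simp [List.foldl, ih]

theorem pv_getD_map_range {β : Type} [Inhabited β] (n i : Nat) (f : Nat → β) (d : β) (h : i < n) :
    ((List.range n).map f).getD i d = f i := by
  rw [List.getD_eq_getElem _ _ (by simpa using h)]
  simp

-- ===== VERDICT (by name: the statement is the Claim_ definition above) =====
theorem MatrizDi_spec : Claim_equal_MatrizDi := by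
  intro mc mt coluna _dom _pre
  unfold Spec_MatrizDi MatrizDi MatrizDi_alt
  simp only [pv_foldl_snoc, List.nil_append]
  apply List.ext_getElem
  · simp
  · intro i hi hi'
    have hin : i < mc.length := by simpa using hi
    simp only [List.getElem_map, List.getElem_range, List.map_map]
    apply List.ext_getElem
    · simp
    · intro j hj hj'
      have hjw : j < (mc.headD []).length := by simpa using hj
      simp only [List.getElem_map, List.getElem_range, Function.comp]
      by_cases hje : (j : Int) = coluna
      · rw [if_pos hje, if_pos hje, pv_getD_map_range _ _ _ _ hin]
      · rw [if_neg hje, if_neg hje, pv_getD_map_range _ _ _ _ hin]
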